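-- pv_equiv track=rewrite | github.com/6-Sense-AI/AIVLE-AlgorithmStudy | [35]주차 기출/[PGS] LV3 불량 사용자/강진구 PGS LV3 불량 사용자.py | solution
-- ===== SOURCE A (Python) =====
-- def compare(id1,id2):
--     cnt = 0
--     cnt_ = 0
--     for i1,i2 in zip(id1,id2):
--         if i1 == i2:
--             cnt += 1
--         if i2 == '*':
--             cnt_ += 1
--     if cnt == len(id2) - cnt_:
--         return True
--     else:
--         return False
--
-- def solution(user_id, banned_id):
--
--     new_list = [[id,[]] for id in banned_id]
--
--     for idx,ban in enumerate(banned_id):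
--         for user in user_id:
--             if len(user)==len(ban):
--                 if compare(user,ban):
--                     new_list[idx][1].append(user)
--
--     path_list = []
--     for element in new_list[0][1]:
--         path_list.append([[element],0])
--
--     total_path = []
--     while path_list:
--         temp_path = path_list.pop()
--         if temp_path[1] == len(banned_id)-1:
--             temp_path[0].sort()
--             total_path.append(tuple(temp_path[0]))
--             continue
--         for element in new_list[temp_path[1]+1][1]:
--             if element not in temp_path[0]:
--                 append_list = temp_path[0][:]
--                 append_list.append(element)
--                 path_list.append([append_list,temp_path[1]+1])
--
--     return len(set(total_path))
-- ===== SOURCE B (Python) =====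
-- def matches(u, b):
--     return len(u) == len(b) and sum(a == c for a, c in zip(u, b)) == len(b) - sum(c == '*' for c in b)
--
-- def solution(user_id, banned_id):
--     match = [[u for u in user_id if matches(u, b)] for b in banned_id]
--     states = {()}
--     for lst in match:
--         states = {tuple(sorted(s + (u,))) for s in states for u in lst if u not in s}
--     return len(states)
-- ===== Notes on version B (the rewrite author's own statement) =====
-- stated objective: alternative
-- what changed: A enumerates every ordering of matched users over the banned patterns with an explicit DFS stack and deduplicates the sorted tuples only at the very end; B instead runs a level-by-level dynamic programming over the SET of reachable user-selections, deduplicating after each banned id, with no stack and no final dedup pass.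
import Mathlib
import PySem

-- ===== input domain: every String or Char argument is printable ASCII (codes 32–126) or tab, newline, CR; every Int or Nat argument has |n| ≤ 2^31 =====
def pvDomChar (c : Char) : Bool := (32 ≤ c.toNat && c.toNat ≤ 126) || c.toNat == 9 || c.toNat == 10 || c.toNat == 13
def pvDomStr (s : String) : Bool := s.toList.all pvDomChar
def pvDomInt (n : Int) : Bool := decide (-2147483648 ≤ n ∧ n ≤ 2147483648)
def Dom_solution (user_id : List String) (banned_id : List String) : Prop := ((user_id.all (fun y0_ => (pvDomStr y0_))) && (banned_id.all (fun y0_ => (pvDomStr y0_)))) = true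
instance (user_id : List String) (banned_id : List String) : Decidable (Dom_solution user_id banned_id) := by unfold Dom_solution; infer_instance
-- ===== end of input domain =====

-- B replaces A's stack-based DFS enumeration of all match-orderings (deduplicated only at the very
-- end) by a level-by-level dynamic programming over the SET of reachable user-selections, which
-- deduplicates after every banned id; equivalence of the RETURN value is proved on nonempty banned_id.

-- ===== PORT A =====
-- 'compare(id1, id2)': one pass over zip(id1, id2) counting equal positions and '*' positions.
def pvCompare (id1 id2 : String) : Bool :=
  let cc := (id1.toList.zip id2.toList).foldl
      (fun (c : Int × Int) p =>
        (if p.1 == p.2 then c.1 + 1 else c.1,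
         if p.2 == '*' then c.2 + 1 else c.2)) (0, 0)
  cc.1 == PySem.Str.len id2 - cc.2

-- weight/measure used only to justify termination of the 'while path_list:' loop below
def pvWeight (nl : List (String × List String)) (k : Nat) : Nat :=
  (1 + (nl.map (fun q => q.2.length)).sum) ^ (nl.length + 1 - k)

def pvMeasure (nl : List (String × List String)) (stack : List (List String × Nat)) : Nat :=
  (stack.map (fun pk => pvWeight nl pk.2)).sum

theorem pvMeasure_append (nl : List (String × List String))
    (s t : List (List String × Nat)) :
    pvMeasure nl (s ++ t) = pvMeasure nl s + pvMeasure nl t := by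
  simp [pvMeasure]

theorem pvMeasure_pop (nl : List (String × List String))
    (s : List (List String × Nat)) (h : s ≠ []) :
    pvMeasure nl s.dropLast + pvWeight nl (s.getLast h).2 = pvMeasure nl s := by
  conv_rhs => rw [← List.dropLast_append_getLast h]
  simp [pvMeasure]

theorem pvWeight_pos (nl : List (String × List String)) (k : Nat) :
    0 < pvWeight nl k := by
  exact pow_pos (by omega) _

theorem pvPushes_eq (t : List String) (k : Nat) (matched : List String) :
    matched.foldl (fun acc e => if e ∈ t then acc else acc ++ [(t ++ [e], k)]) [] =
      (matched.filter (fun e => decide (e ∉ t))).map (fun e => (t ++ [e], k)) := by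
  rw [PySem.List.foldl_congr_mem _ _
      (fun acc e => if e ∉ t then acc ++ [(t ++ [e], k)] else acc) _
      (by intro acc x _; by_cases h : x ∈ t <;> simp [h])]
  simpa using PySem.List.foldl_append_ite (fun e => e ∉ t) (fun e => (t ++ [e], k)) matched []

theorem pvGetD_len_le (nl : List (String × List String)) (i : Nat) :
    (nl.getD i ("", [])).2.length ≤ (nl.map (fun q => q.2.length)).sum := by
  by_cases h : i < nl.length
  · rw [List.getD_eq_getElem nl _ h]
    exact List.single_le_sum (by intro x _; omega) _ (by
      exact List.mem_map.mpr ⟨nl[i], List.getElem_mem h, rfl⟩)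
  · rw [List.getD_eq_default nl _ (by omega)]
    simp

theorem pvStep_lt (nl : List (String × List String)) (t : List String) (k : Nat)
    (rest : List (List String × Nat)) :
    pvMeasure nl (rest ++ ((nl.getD (k + 1) ("", [])).2.foldl
        (fun acc e => if e ∈ t then acc else acc ++ [(t ++ [e], k + 1)]) [])) <
      pvMeasure nl rest + pvWeight nl k := by
  rw [pvMeasure_append, pvPushes_eq]
  by_cases hk : k ≤ nl.length
  · have hmeas : pvMeasure nl (((nl.getD (k + 1) ("", [])).2.filter
        (fun e => decide (e ∉ t))).map (fun e => (t ++ [e], k + 1))) =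
        ((nl.getD (k + 1) ("", [])).2.filter (fun e => decide (e ∉ t))).length *
          pvWeight nl (k + 1) := by
      simp [pvMeasure, List.map_map, Function.comp_def, List.map_const', List.sum_replicate,
        smul_eq_mul, Nat.mul_comm]
    have hlen : ((nl.getD (k + 1) ("", [])).2.filter (fun e => decide (e ∉ t))).length ≤
        (nl.map (fun q => q.2.length)).sum :=
      le_trans (List.length_filter_le _ _) (pvGetD_len_le nl (k + 1))
    have hw : pvWeight nl k = (1 + (nl.map (fun q => q.2.length)).sum) * pvWeight nl (k + 1) := by
      simp only [pvWeight]
      rw [← pow_succ']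
      congr 1
      omega
    rw [hmeas, hw]
    exact Nat.add_lt_add_left
      ((Nat.mul_lt_mul_right (pvWeight_pos nl (k + 1))).mpr (by omega)) _
  · have hd : nl.getD (k + 1) ("", []) = ("", []) := List.getD_eq_default _ _ (by omega)
    rw [hd]
    simp only [List.filter_nil, List.map_nil]
    have : pvMeasure nl [] = 0 := rfl
    rw [this]
    have := pvWeight_pos nl k
    omega

-- the 'while path_list:' loop of A: pop from the end, complete paths go (sorted) into 'total',
-- otherwise push all one-step extensions by users matched to the next banned id.
def pvALoop (nl : List (String × List String)) (m : Nat)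
    (stack : List (List String × Nat)) (total : List (List String)) :
    List (List String) :=
  if hs : stack = [] then total
  else
    -- temp_path = path_list.pop()  (stack.getLast hs plays temp_path, stack.dropLast the rest)
    if (stack.getLast hs).2 == m - 1 then
      pvALoop nl m stack.dropLast
        (total ++ [PySem.List.sorted (stack.getLast hs).1 (fun x => x) false])
    else
      -- Python: new_list[temp_path[1]+1][1]; in-range on every reachable state (idx+1 ≤ m-1 < len(new_list))
      pvALoop nl m
        (stack.dropLast ++ ((nl.getD ((stack.getLast hs).2 + 1) ("", [])).2.foldl
          (fun acc e => if e ∈ (stack.getLast hs).1 then acc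
            else acc ++ [((stack.getLast hs).1 ++ [e], (stack.getLast hs).2 + 1)]) []))
        total
termination_by pvMeasure nl stack
decreasing_by
  · rw [← pvMeasure_pop nl stack hs]
    exact Nat.lt_add_of_pos_right (pvWeight_pos nl _)
  · rw [← pvMeasure_pop nl stack hs]
    exact pvStep_lt nl _ _ _

def solution (user_id : List String) (banned_id : List String) : Int :=
  let new_list : List (String × List String) :=
    banned_id.map (fun ban =>
      (ban, user_id.foldl (fun acc user =>
          if PySem.Str.len user == PySem.Str.len ban then
            (if pvCompare user ban then acc ++ [user] else acc)
          else acc) []))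
  match new_list with
  | [] => 0  -- Python raises IndexError on new_list[0] here (banned_id = []); excluded by Pre_solution
  | first :: _ =>
    let path_list := first.2.map (fun e => ([e], (0 : Nat)))
    let total_path := pvALoop new_list banned_id.length path_list []
    ((PySem.Set.ofList total_path).length : Int)

-- ===== PORT B =====
-- 'matches(u, b)' of Source B
def pvMatches (u b : String) : Bool :=
  PySem.Str.len u == PySem.Str.len b &&
  (((u.toList.zip b.toList).map (fun p => if p.1 == p.2 then (1 : Int) else 0)).sum ==
    PySem.Str.len b - (b.toList.map (fun c => if c == '*' then (1 : Int) else 0)).sum)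

-- one round of Source B's set comprehension: {tuple(sorted(s + (u,))) for s in states for u in lst if u not in s}
def pvBStep (st : List (List String)) (lst : List String) : List (List String) :=
  PySem.Set.ofList (st.flatMap (fun s =>
    (lst.filter (fun u => decide (u ∉ s))).map
      (fun u => PySem.List.sorted (s ++ [u]) (fun x => x) false)))

def solution_alt (user_id : List String) (banned_id : List String) : Int :=
  let mtch := banned_id.map (fun b => user_id.filter (fun u => pvMatches u b))
  let states := mtch.foldl pvBStep (PySem.Set.ofList [([] : List String)])
  (states.length : Int)

-- ===== PRECONDITION & SPEC =====
-- Pre_ excludes exactly banned_id = [], where A raises IndexError on new_list[0] (B returns 1 there).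
def Pre_solution (user_id : List String) (banned_id : List String) : Prop := banned_id ≠ []
instance (user_id : List String) (banned_id : List String) : Decidable (Pre_solution user_id banned_id) := by unfold Pre_solution; infer_instance

def pvWitness_solution : List String × List String := (["abc", "abd"], ["ab*"])

def Spec_solution (user_id : List String) (banned_id : List String) (out : Int) : Prop := out = solution_alt user_id banned_id
instance (user_id : List String) (banned_id : List String) (out : Int) : Decidable (Spec_solution user_id banned_id out) := by unfold Spec_solution; infer_instance

-- ===== CLAIM (what is proved, stated in full; the proofs are below) =====
def Claim_equal_solution : Prop := ∀ (user_id : List String) (banned_id : List String), Dom_solution user_id banned_id → Pre_solution user_id banned_id → Spec_solution user_id banned_id (solution user_id banned_id)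

-- ===== LEMMAS AND PROOFS =====

-- the distinct complete selections reachable from partial path p through the remaining match lists
def pvComps : List (List String) → List String → List (List String)
  | [], p => [PySem.List.sorted p (fun x => x) false]
  | M :: rest, p => (M.filter (fun u => decide (u ∉ p))).flatMap (fun u => pvComps rest (p ++ [u]))

-- the same, phrased on B's canonical (sorted) states
def pvAfter : List (List String) → List String → List (List String)
  | [], s => [s]
  | M :: rest, s => (M.filter (fun u => decide (u ∉ s))).flatMap
      (fun u => pvAfter rest (PySem.List.sorted (s ++ [u]) (fun x => x) false))

theorem pvAfter_comps (ls : List (List String)) :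
    ∀ (p x : List String),
      (x ∈ pvAfter ls (PySem.List.sorted p (fun x => x) false) ↔ x ∈ pvComps ls p) := by
  induction ls with
  | nil => intro p x; simp [pvAfter, pvComps]
  | cons M rest ih =>
    intro p x
    have hmem : ∀ u : String, (u ∈ PySem.List.sorted p (fun x => x) false) ↔ u ∈ p :=
      fun u => (PySem.List.sorted_perm p (fun x => x) false).mem_iff
    have hsort : ∀ u : String,
        PySem.List.sorted (PySem.List.sorted p (fun x => x) false ++ [u]) (fun x => x) false =
          PySem.List.sorted (p ++ [u]) (fun x => x) false :=
      fun u => (PySem.List.sorted_id_eq_sorted_id_iff_perm _ _).mpr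
        ((PySem.List.sorted_perm p (fun x => x) false).append_right [u])
    simp only [pvAfter, pvComps, List.mem_flatMap, List.mem_filter]
    constructor
    · rintro ⟨u, ⟨hu, hnot⟩, hx⟩
      refine ⟨u, ⟨hu, by simpa [hmem u] using hnot⟩, ?_⟩
      rw [hsort u] at hx; exact (ih (p ++ [u]) x).mp hx
    · rintro ⟨u, ⟨hu, hnot⟩, hx⟩
      refine ⟨u, ⟨hu, by simpa [hmem u] using hnot⟩, ?_⟩
      rw [hsort u]; exact (ih (p ++ [u]) x).mpr hx

theorem pvBFold_mem (ls : List (List String)) :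
    ∀ (S : List (List String)) (x : List String),
      (x ∈ ls.foldl pvBStep S ↔ ∃ s ∈ S, x ∈ pvAfter ls s) := by
  induction ls with
  | nil => intro S x; simp [pvAfter]
  | cons M rest ih =>
    intro S x
    rw [List.foldl_cons, ih]
    simp only [pvBStep, pvAfter, PySem.Set.mem_ofList, List.mem_flatMap, List.mem_map,
      List.mem_filter]
    constructor
    · rintro ⟨t, ⟨s, hs, u, ⟨hu, hnot⟩, rfl⟩, hx⟩
      exact ⟨s, hs, u, ⟨hu, hnot⟩, hx⟩
    · rintro ⟨s, hs, u, ⟨hu, hnot⟩, hx⟩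
      exact ⟨_, ⟨s, hs, u, ⟨hu, hnot⟩, rfl⟩, hx⟩

theorem pvBFold_nodup (ls : List (List String)) :
    ∀ (S : List (List String)), S.Nodup → (ls.foldl pvBStep S).Nodup := by
  induction ls with
  | nil => intro S h; exact h
  | cons M rest ih =>
    intro S _
    exact ih _ (PySem.Set.nodup_ofList _)

theorem pvExists_mem_concat {α : Type} (l : List α) (t : α) (P : α → Prop) :
    (∃ pk ∈ l ++ [t], P pk) ↔ (∃ pk ∈ l, P pk) ∨ P t := by
  constructor
  · rintro ⟨pk, hpk, hP⟩
    rcases List.mem_append.mp hpk with h | h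
    · exact Or.inl ⟨pk, h, hP⟩
    · exact Or.inr (List.mem_singleton.mp h ▸ hP)
  · rintro (⟨pk, hpk, hP⟩ | hP)
    · exact ⟨pk, List.mem_append_left _ hpk, hP⟩
    · exact ⟨t, List.mem_append_right _ (List.mem_singleton.mpr rfl), hP⟩

theorem pvExists_mem_append {α : Type} (l l' : List α) (P : α → Prop) :
    (∃ pk ∈ l ++ l', P pk) ↔ (∃ pk ∈ l, P pk) ∨ (∃ pk ∈ l', P pk) := by
  constructor
  · rintro ⟨pk, hpk, hP⟩
    rcases List.mem_append.mp hpk with h | h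
    · exact Or.inl ⟨pk, h, hP⟩
    · exact Or.inr ⟨pk, h, hP⟩
  · rintro (⟨pk, hpk, hP⟩ | ⟨pk, hpk, hP⟩)
    · exact ⟨pk, List.mem_append_left _ hpk, hP⟩
    · exact ⟨pk, List.mem_append_right _ hpk, hP⟩

theorem pvALoop_mem (nl : List (String × List String)) :
    ∀ (stack : List (List String × Nat)) (total : List (List String)),
      (∀ pk ∈ stack, pk.2 < nl.length) →
      ∀ (x : List String),
      (x ∈ pvALoop nl nl.length stack total ↔
        x ∈ total ∨ ∃ pk ∈ stack, x ∈ pvComps ((nl.map (fun q => q.2)).drop (pk.2 + 1)) pk.1) := by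
  suffices H : ∀ (n : Nat) (stack : List (List String × Nat)) (total : List (List String)),
      pvMeasure nl stack = n →
      (∀ pk ∈ stack, pk.2 < nl.length) →
      ∀ (x : List String),
      (x ∈ pvALoop nl nl.length stack total ↔
        x ∈ total ∨ ∃ pk ∈ stack, x ∈ pvComps ((nl.map (fun q => q.2)).drop (pk.2 + 1)) pk.1) by
    exact fun stack total => H (pvMeasure nl stack) stack total rfl
  intro n
  induction n using Nat.strong_induction_on with
  | _ n ih =>
    intro stack total hn hinv x
    by_cases hs : stack = []
    · subst hs
      rw [pvALoop, dif_pos rfl]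
      simp
    · have htemp := hinv _ (List.getLast_mem hs)
      by_cases hbeq : ((stack.getLast hs).2 == nl.length - 1) = true
      · have hk : (stack.getLast hs).2 = nl.length - 1 := by simpa using hbeq
        rw [pvALoop, dif_neg hs, if_pos hbeq]
        rw [ih (pvMeasure nl stack.dropLast)
          (by rw [← hn, ← pvMeasure_pop nl stack hs]
              exact Nat.lt_add_of_pos_right (pvWeight_pos nl _)) _ _ rfl
          (fun pk hpk => hinv pk (List.dropLast_subset _ hpk))]
        conv_rhs => rw [← List.dropLast_append_getLast hs]
        rw [pvExists_mem_concat]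
        have hdrop : ((nl.map (fun q => q.2)).drop ((stack.getLast hs).2 + 1)) = [] := by
          apply List.drop_eq_nil_of_le
          simp only [List.length_map, hk]
          omega
        rw [hdrop]
        simp only [pvComps, List.mem_singleton, List.mem_append]
        constructor
        · rintro ((h | h) | h)
          exacts [Or.inl h, Or.inr (Or.inr h), Or.inr (Or.inl h)]
        · rintro (h | h | h)
          exacts [Or.inl (Or.inl h), Or.inr h, Or.inl (Or.inr h)]
      · have hne : (stack.getLast hs).2 ≠ nl.length - 1 := by simpa using hbeq
        have hlt : (stack.getLast hs).2 + 1 < nl.length := by omega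
        rw [pvALoop, dif_neg hs, if_neg hbeq]
        rw [ih (pvMeasure nl (stack.dropLast ++ ((nl.getD ((stack.getLast hs).2 + 1) ("", [])).2.foldl
            (fun acc e => if e ∈ (stack.getLast hs).1 then acc
              else acc ++ [((stack.getLast hs).1 ++ [e], (stack.getLast hs).2 + 1)]) [])))
          (by rw [← hn, ← pvMeasure_pop nl stack hs]
              exact pvStep_lt nl _ _ _) _ _ rfl
          (by
            intro pk hpk
            rcases List.mem_append.mp hpk with hm | hm
            · exact hinv pk (List.dropLast_subset _ hm)
            · rw [pvPushes_eq] at hm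
              rcases List.mem_map.mp hm with ⟨e, _, rfl⟩
              exact hlt)]
        rw [pvPushes_eq, pvExists_mem_append]
        conv_rhs => rw [← List.dropLast_append_getLast hs]
        rw [pvExists_mem_concat]
        have hdrop : ((nl.map (fun q => q.2)).drop ((stack.getLast hs).2 + 1)) =
            (nl.getD ((stack.getLast hs).2 + 1) ("", [])).2 ::
              ((nl.map (fun q => q.2)).drop ((stack.getLast hs).2 + 2)) := by
          rw [List.drop_eq_getElem_cons (by simpa using hlt)]
          rw [List.getElem_map]
          rw [List.getD_eq_getElem nl _ hlt]
        rw [hdrop]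
        simp only [pvComps, List.mem_flatMap, List.mem_filter, List.mem_map]
        constructor
        · rintro (hx | ⟨pk, hrest, hc⟩ | ⟨pk, ⟨e, he, rfl⟩, hc⟩)
          · exact Or.inl hx
          · exact Or.inr (Or.inl ⟨pk, hrest, hc⟩)
          · exact Or.inr (Or.inr ⟨e, he, hc⟩)
        · rintro (hx | ⟨pk, hrest, hc⟩ | ⟨e, he, hc⟩)
          · exact Or.inl hx
          · exact Or.inr (Or.inl ⟨pk, hrest, hc⟩)
          · exact Or.inr (Or.inr ⟨_, ⟨e, he, rfl⟩, hc⟩)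

theorem pvMatches_eq_guard (u ban : String) :
    (PySem.Str.len u == PySem.Str.len ban && pvCompare u ban) = pvMatches u ban := by
  by_cases hlen : (PySem.Str.len u == PySem.Str.len ban) = true
  · have hl : u.toList.length = ban.toList.length := by
      rw [PySem.Str.len_eq, PySem.Str.len_eq] at hlen
      exact_mod_cast beq_iff_eq.mp hlen
    simp only [pvMatches, pvCompare, hlen, Bool.true_and]
    have hfold : (u.toList.zip ban.toList).foldl
        (fun (c : Int × Int) p =>
          (if p.1 == p.2 then c.1 + 1 else c.1, if p.2 == '*' then c.2 + 1 else c.2)) (0, 0) =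
        ((u.toList.zip ban.toList).foldl (fun (c : Int) p => if p.1 == p.2 then c + 1 else c) 0,
         (u.toList.zip ban.toList).foldl (fun (c : Int) p => if p.2 == '*' then c + 1 else c) 0) :=
      PySem.List.foldl_prod_mk (f := fun (c : Int) p => if p.1 == p.2 then c + 1 else c)
        (g := fun (c : Int) p => if p.2 == '*' then c + 1 else c) (u.toList.zip ban.toList) 0 0
    rw [hfold]
    simp only [PySem.List.foldl_if_add_one, PySem.List.sum_map_ite_one_zero]
    have hcnt : List.countP (fun p => p.2 == '*') (u.toList.zip ban.toList) =
        List.countP (fun c => c == '*') ban.toList := by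
      conv_rhs => rw [← List.map_snd_zip (l₁ := u.toList) (l₂ := ban.toList) (by omega)]
      rw [List.countP_map]
      rfl
    rw [hcnt]
    simp
  · have hlen' : (PySem.Str.len u == PySem.Str.len ban) = false := by
      simpa using hlen
    simp only [pvMatches, hlen', Bool.false_and]

theorem pvAm_eq (user_id : List String) (ban : String) :
    user_id.foldl (fun acc user =>
        if PySem.Str.len user == PySem.Str.len ban then
          (if pvCompare user ban then acc ++ [user] else acc)
        else acc) [] = user_id.filter (fun u => pvMatches u ban) := by
  rw [PySem.List.foldl_congr_mem _ _
      (fun acc user => if pvMatches user ban then acc ++ [user] else acc) _ ?_]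
  · simpa using PySem.List.foldl_append_if_eq_filter (fun u => pvMatches u ban) user_id []
  · intro acc x _
    beta_reduce
    rw [← pvMatches_eq_guard]
    cases hb : (PySem.Str.len x == PySem.Str.len ban) <;> cases hc : pvCompare x ban <;>
      simp

-- ===== VERDICT (by name: the statement is the Claim_ definition above) =====
theorem solution_spec : Claim_equal_solution := by
  intro user_id banned_id _ hpre
  unfold Spec_solution
  cases banned_id with
  | nil => exact absurd rfl hpre
  | cons b bs =>
    have ham : ∀ ban : String, user_id.foldl (fun acc user =>
        if PySem.Str.len user == PySem.Str.len ban then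
          (if pvCompare user ban then acc ++ [user] else acc)
        else acc) [] = user_id.filter (fun u => pvMatches u ban) := fun ban => pvAm_eq user_id ban
    simp only [solution, solution_alt, List.map_cons, ham]
    norm_cast
    apply List.Perm.length_eq
    rw [List.perm_ext_iff_of_nodup (PySem.Set.nodup_ofList _)
      (pvBFold_nodup _ _ (PySem.Set.nodup_ofList _))]
    intro x
    rw [PySem.Set.mem_ofList]
    rw [show (b :: bs).length =
        (((b, List.filter (fun u => pvMatches u b) user_id) ::
          List.map (fun ban => (ban, List.filter (fun u => pvMatches u ban) user_id)) bs).length)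
      by simp]
    rw [pvALoop_mem _ _ _
      (by intro pk hpk; rcases List.mem_map.mp hpk with ⟨e, _, rfl⟩; simp) x]
    rw [pvBFold_mem]
    rw [show PySem.Set.ofList [([] : List String)] = [[]] from rfl]
    rw [show (∃ s ∈ [([] : List String)], x ∈ pvAfter
        (List.filter (fun u => pvMatches u b) user_id ::
          List.map (fun b => List.filter (fun u => pvMatches u b) user_id) bs) s) ↔
        x ∈ pvComps (List.filter (fun u => pvMatches u b) user_id ::
          List.map (fun b => List.filter (fun u => pvMatches u b) user_id) bs) [] by
      constructor
      · rintro ⟨s, hs, hx⟩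
        rw [List.mem_singleton] at hs
        subst hs
        exact (pvAfter_comps _ [] x).mp hx
      · intro hx
        exact ⟨[], List.mem_singleton.mpr rfl, (pvAfter_comps _ [] x).mpr hx⟩]
    simp only [List.not_mem_nil, false_or, List.mem_map, List.map_cons, List.map_map,
      Function.comp_def, List.drop_succ_cons, pvComps, List.mem_flatMap,
      List.mem_filter, decide_not, List.nil_append]
    constructor
    · rintro ⟨pk, ⟨e, he, rfl⟩, hc⟩
      exact ⟨e, ⟨he, by simp⟩, hc⟩
    · rintro ⟨u, ⟨hu, _⟩, hc⟩
      exact ⟨([u], 0), ⟨u, hu, rfl⟩, hc⟩
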